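-- pv_equiv track=rewrite | github.com/nixonyung/Google-Foobar | Q8helper.py | is_valid_distribution
-- ===== SOURCE A (Python) =====
-- import itertools
--
-- def is_valid_distribution(distributions, num_required, num_doors):
--     for i in range(1, num_required):
--         for selecting_fewer_buns in itertools.combinations(distributions, i):
--             if set().union(*selecting_fewer_buns) == set(range(num_doors)):
--                 return False
--     for selecting_all_required_buns in itertools.combinations(
--         distributions, num_required
--     ):
--         if set().union(*selecting_all_required_buns) != set(range(num_doors)):
--             return False
--     return True
-- ===== SOURCE B (Python) =====
-- import itertools
--
--
-- def is_valid_distribution(distributions, num_required, num_doors):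
--     doors = set(range(num_doors))
--
--     def exists_bad_selection(r):
--         """Is there a way to pick r of the buns whose combined keys are not
--         exactly the set of doors?"""
--         if r > len(distributions):
--             return False  # nothing to pick
--         if r >= 1 and any(set(bun) - doors for bun in distributions):
--             return True  # a bun with a key to no door spoils every pick containing it
--         # otherwise a pick fails exactly by leaving some door unopened
--         return any(
--             sum(1 for bun in distributions if d not in bun) >= r for d in doors
--         )
--
--     # minimality: no pick of fewer than num_required buns opens every door
--     for i in range(1, num_required):
--         for group in itertools.combinations(distributions, i):
--             if set().union(*group) == doors:
--                 return False
--     # sufficiency: every pick of num_required buns opens exactly the doors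
--     return not exists_bad_selection(num_required)
-- ===== Notes on version B (the rewrite author's own statement) =====
-- stated objective: alternative
-- what changed: The sufficiency check over all C(n, num_required) groups is replaced by a helper that decides in one pass whether some pick of num_required buns fails (a bun holding a non-door key, or a door missed by at least num_required buns); the minimality loop is kept, and Pre_ only excludes num_required < 0, where A raises ValueError from itertools.combinations.
import Mathlib
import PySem

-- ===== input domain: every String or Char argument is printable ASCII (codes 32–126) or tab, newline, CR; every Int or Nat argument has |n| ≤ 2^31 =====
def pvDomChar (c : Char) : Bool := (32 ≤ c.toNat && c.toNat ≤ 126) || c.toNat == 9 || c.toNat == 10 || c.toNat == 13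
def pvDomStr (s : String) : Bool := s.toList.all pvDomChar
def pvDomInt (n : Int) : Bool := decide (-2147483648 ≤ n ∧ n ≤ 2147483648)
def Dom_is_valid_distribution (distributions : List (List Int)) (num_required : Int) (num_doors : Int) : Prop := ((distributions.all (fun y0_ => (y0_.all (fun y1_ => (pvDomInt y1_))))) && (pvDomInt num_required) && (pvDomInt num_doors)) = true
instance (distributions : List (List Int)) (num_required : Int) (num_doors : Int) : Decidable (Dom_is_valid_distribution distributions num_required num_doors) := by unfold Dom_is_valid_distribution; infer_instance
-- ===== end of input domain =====

-- B replaces A's C(n, num_required) sufficiency enumeration by one per-door miss-count pass;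
-- the minimality loop is kept.

-- ===== PORT A =====
-- itertools.combinations(xs, k): the position-subsequences of xs of length k (itertools order)
def pvCombos {α : Type} : Nat → List α → List (List α)
  | 0, _ => [[]]
  | _ + 1, [] => []
  | k + 1, x :: xs => ((pvCombos k xs).map (fun s => x :: s)) ++ pvCombos (k + 1) xs

-- set().union(*sel)
def pvUnionAll (sel : List (List Int)) : PySem.Set Int :=
  sel.foldl (fun s bun => PySem.Set.update s bun) PySem.Set.empty

-- set(range(num_doors))
def pvDoors (num_doors : Int) : PySem.Set Int :=
  PySem.Set.ofList (PySem.List.pyRange 0 num_doors 1)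

def is_valid_distribution (distributions : List (List Int)) (num_required : Int) (num_doors : Int) : Bool :=
  if (PySem.List.pyRange 1 num_required 1).any (fun i =>
      (pvCombos i.toNat distributions).any (fun sel =>
        PySem.Set.equal (pvUnionAll sel) (pvDoors num_doors))) then false
  else if (pvCombos num_required.toNat distributions).any (fun sel =>
      ! PySem.Set.equal (pvUnionAll sel) (pvDoors num_doors)) then false
  else true

-- ===== PORT B =====
-- exists_bad_selection(r): can r buns be picked whose combined keys are not exactly the doors?
def pvExistsBadSelection (distributions : List (List Int)) (num_doors : Int) (r : Int) : Bool :=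
  if decide ((distributions.length : Int) < r) then false
  else if decide (1 ≤ r) && distributions.any (fun bun =>
      decide (PySem.Set.diff (PySem.Set.ofList bun) (pvDoors num_doors) ≠ [])) then true
  else (pvDoors num_doors).any (fun d =>
      decide (r ≤ ((distributions.countP (fun bun => decide (d ∉ bun))) : Int)))

def is_valid_distribution_alt (distributions : List (List Int)) (num_required : Int) (num_doors : Int) : Bool :=
  if (PySem.List.pyRange 1 num_required 1).any (fun i =>
      (pvCombos i.toNat distributions).any (fun group =>
        PySem.Set.equal (pvUnionAll group) (pvDoors num_doors))) then false
  else ! pvExistsBadSelection distributions num_doors num_required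

-- ===== PRECONDITION & SPEC =====
-- Pre_ excludes only num_required < 0, where A raises ValueError (itertools.combinations with negative r).
def Pre_is_valid_distribution (distributions : List (List Int)) (num_required : Int) (num_doors : Int) : Prop :=
  0 ≤ num_required
instance (distributions : List (List Int)) (num_required : Int) (num_doors : Int) : Decidable (Pre_is_valid_distribution distributions num_required num_doors) := by unfold Pre_is_valid_distribution; infer_instance

def pvWitness_is_valid_distribution : List (List Int) × Int × Int := ([[0], [0]], 1, 1)

def Spec_is_valid_distribution (distributions : List (List Int)) (num_required : Int) (num_doors : Int) (out : Bool) : Prop := out = is_valid_distribution_alt distributions num_required num_doors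
instance (distributions : List (List Int)) (num_required : Int) (num_doors : Int) (out : Bool) : Decidable (Spec_is_valid_distribution distributions num_required num_doors out) := by unfold Spec_is_valid_distribution; infer_instance

-- ===== CLAIM (what is proved, stated in full; the proofs are below) =====
def Claim_equal_is_valid_distribution : Prop := ∀ (distributions : List (List Int)) (num_required : Int) (num_doors : Int), Dom_is_valid_distribution distributions num_required num_doors → Pre_is_valid_distribution distributions num_required num_doors → Spec_is_valid_distribution distributions num_required num_doors (is_valid_distribution distributions num_required num_doors)


-- ===== LEMMAS AND PROOFS =====

theorem mem_pvCombos {α : Type} (n : Nat) (xs : List α) (S : List α) :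
    S ∈ pvCombos n xs ↔ S.Sublist xs ∧ S.length = n := by
  induction xs generalizing n S with
  | nil =>
    cases n with
    | zero =>
      simp only [pvCombos, List.mem_singleton]
      constructor
      · rintro rfl; exact ⟨List.Sublist.refl _, rfl⟩
      · rintro ⟨h, _⟩; exact List.sublist_nil.mp h
    | succ k =>
      constructor
      · intro h; simp [pvCombos] at h
      · rintro ⟨h, hl⟩
        rcases List.sublist_nil.mp h
        simp at hl
  | cons x xs ih =>
    cases n with
    | zero =>
      simp only [pvCombos, List.mem_singleton]
      constructor
      · rintro rfl; exact ⟨List.nil_sublist _, rfl⟩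
      · rintro ⟨_, hl⟩; exact List.eq_nil_of_length_eq_zero hl
    | succ k =>
      constructor
      · intro h
        simp only [pvCombos, List.mem_append, List.mem_map] at h
        rcases h with ⟨T, hT, rfl⟩ | h
        · rcases (ih k T).mp hT with ⟨hs, hl⟩
          exact ⟨hs.cons₂ x, by simp [hl]⟩
        · rcases (ih (k + 1) S).mp h with ⟨hs, hl⟩
          exact ⟨hs.cons x, hl⟩
      · rintro ⟨hs, hl⟩
        simp only [pvCombos, List.mem_append, List.mem_map]
        cases hs with
        | cons _ h' => exact Or.inr ((ih (k + 1) S).mpr ⟨h', hl⟩)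
        | cons₂ _ h' =>
          exact Or.inl ⟨_, (ih k _).mpr ⟨h', by simpa using hl⟩, rfl⟩

theorem mem_foldl_update (l : List (List Int)) (s : PySem.Set Int) (y : Int) :
    y ∈ l.foldl (fun s bun => PySem.Set.update s bun) s ↔ y ∈ s ∨ ∃ bun ∈ l, y ∈ bun := by
  induction l generalizing s with
  | nil => simp
  | cons b l ih =>
    simp only [List.foldl_cons, ih, PySem.Set.mem_update, List.mem_cons]
    constructor
    · rintro (( h | h) | ⟨bun, hb, hy⟩)
      · exact Or.inl h
      · exact Or.inr ⟨b, Or.inl rfl, h⟩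
      · exact Or.inr ⟨bun, Or.inr hb, hy⟩
    · rintro (h | ⟨bun, (rfl | hb), hy⟩)
      · exact Or.inl (Or.inl h)
      · exact Or.inl (Or.inr hy)
      · exact Or.inr ⟨bun, hb, hy⟩

theorem mem_pvUnionAll (sel : List (List Int)) (y : Int) :
    y ∈ pvUnionAll sel ↔ ∃ bun ∈ sel, y ∈ bun := by
  rw [pvUnionAll, mem_foldl_update]
  simp [PySem.Set.empty]

theorem mem_pvDoors (num_doors : Int) (y : Int) :
    y ∈ pvDoors num_doors ↔ 0 ≤ y ∧ y < num_doors := by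
  simp [pvDoors, PySem.Set.mem_ofList, PySem.List.mem_pyRange_one]

-- there is a length-n subsequence containing a given element iff 1 ≤ n ≤ length
theorem exists_sublist_len_mem {α : Type} {b : α} {xs : List α} (hb : b ∈ xs)
    {n : Nat} (h1 : 1 ≤ n) (h2 : n ≤ xs.length) :
    ∃ S : List α, S.Sublist xs ∧ S.length = n ∧ b ∈ S := by
  obtain ⟨l1, l2, rfl⟩ := List.append_of_mem hb
  simp only [List.length_append, List.length_cons] at h2
  by_cases hc : n - 1 ≤ l1.length
  · refine ⟨l1.take (n - 1) ++ [b], ?_, ?_, by simp⟩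
    · exact (l1.take_sublist (n - 1)).append ((List.nil_sublist l2).cons₂ b)
    · simp only [List.length_append, List.length_take, List.length_cons, List.length_nil]
      omega
  · refine ⟨l1 ++ b :: l2.take (n - 1 - l1.length), ?_, ?_, by simp⟩
    · exact (List.Sublist.refl l1).append ((l2.take_sublist _).cons₂ b)
    · simp only [List.length_append, List.length_take, List.length_cons]
      omega

-- there is a length-n subsequence of p-elements iff n ≤ countP p
theorem exists_sublist_len_all {α : Type} {p : α → Bool} {xs : List α} {n : Nat}
    (h : n ≤ xs.countP p) :
    ∃ S : List α, S.Sublist xs ∧ S.length = n ∧ ∀ x ∈ S, p x := by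
  have hcf : (xs.filter p).length = xs.countP p := List.countP_eq_length_filter.symm
  refine ⟨(xs.filter p).take n, ((xs.filter p).take_sublist n).trans (xs.filter_sublist), ?_, ?_⟩
  · rw [List.length_take]; omega
  · intro x hx
    exact (List.mem_filter.mp (List.mem_of_mem_take hx)).2

-- a bun's stray keys, as B tests them
theorem stray_iff (bun : List Int) (nd : Int) :
    (PySem.Set.diff (PySem.Set.ofList bun) (pvDoors nd) ≠ []) ↔ ∃ t ∈ bun, ¬ (0 ≤ t ∧ t < nd) := by
  rw [← List.isEmpty_eq_false_iff, List.isEmpty_eq_false_iff_exists_mem]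
  constructor
  · rintro ⟨y, hy⟩
    rw [PySem.Set.mem_diff, PySem.Set.mem_ofList, mem_pvDoors] at hy
    exact ⟨y, hy.1, hy.2⟩
  · rintro ⟨t, ht, hnd⟩
    exact ⟨t, by rw [PySem.Set.mem_diff, PySem.Set.mem_ofList, mem_pvDoors]; exact ⟨ht, hnd⟩⟩

-- the heart: A's sufficiency enumeration answers B's "exists a bad selection" question
theorem loop2_eq (ds : List (List Int)) (nr nd : Int) (hnr : 0 ≤ nr) :
    ((pvCombos nr.toNat ds).any (fun sel =>
        ! PySem.Set.equal (pvUnionAll sel) (pvDoors nd)))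
    = pvExistsBadSelection ds nd nr := by
  unfold pvExistsBadSelection
  rw [Bool.eq_iff_iff]
  split_ifs with hlen hbad
  · -- no selection of nr buns exists
    simp only [decide_eq_true_eq] at hlen
    simp only [List.any_eq_true, mem_pvCombos, iff_false, not_exists]
    rintro S ⟨⟨hs, hl⟩, -⟩
    have := hs.length_le
    omega
  · -- some bun holds a stray key, and a selection containing it exists
    simp only [decide_eq_true_eq, Bool.and_eq_true, List.any_eq_true] at hlen hbad
    obtain ⟨h1, bun, hbds, hstray⟩ := hbad
    obtain ⟨t, htb, htnd⟩ := (stray_iff bun nd).mp hstray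
    simp only [iff_true, List.any_eq_true, mem_pvCombos, Bool.not_eq_true', Bool.eq_false_iff,
      Ne, PySem.Set.equal_iff]
    have hn1 : 1 ≤ nr.toNat := by omega
    have hn2 : nr.toNat ≤ ds.length := by omega
    obtain ⟨S, hs, hl, hbS⟩ := exists_sublist_len_mem hbds hn1 hn2
    refine ⟨S, ⟨hs, hl⟩, ?_⟩
    intro hall
    exact htnd ((mem_pvDoors nd t).mp ((hall t).mp ((mem_pvUnionAll S t).mpr ⟨bun, hbS, htb⟩)))
  · -- no stray key in any pickable bun: failure means exactly a door missed by ≥ nr buns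
    simp only [decide_eq_true_eq] at hlen
    simp only [decide_eq_true_eq, Bool.and_eq_true, List.any_eq_true, not_and, not_exists] at hbad
    simp only [List.any_eq_true, mem_pvCombos, Bool.not_eq_true', Bool.eq_false_iff, Ne,
      PySem.Set.equal_iff, decide_eq_true_eq, mem_pvDoors]
    constructor
    · rintro ⟨S, ⟨hs, hl⟩, hne⟩
      push Not at hne
      obtain ⟨y, hy⟩ := hne
      rw [mem_pvUnionAll] at hy
      rcases hy with ⟨⟨bun, hbS, hyb⟩, hynd⟩ | ⟨hynu, hyd⟩
      · -- a stray key would contradict this case (S is nonempty, so nr ≥ 1)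
        exfalso
        have hSne : S ≠ [] := by rintro rfl; simp at hbS
        have h1 : 1 ≤ nr := by
          have := List.length_pos_iff.mpr hSne
          omega
        exact hbad h1 bun (hs.subset hbS)
          ((stray_iff bun nd).mpr ⟨y, hyb, by omega⟩)
      · -- y is a door every bun of S misses
        refine ⟨y, hyd, ?_⟩
        have hmiss : ∀ bun ∈ S, (fun bun => decide (y ∉ bun)) bun = true := by
          intro bun hb
          simp only [decide_eq_true_eq]
          exact fun hyb => hynu ⟨bun, hb, hyb⟩
        have hsub : S.Sublist (ds.filter (fun bun => decide (y ∉ bun))) := by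
          have := hs.filter (fun bun => decide (y ∉ bun))
          rwa [List.filter_eq_self.mpr hmiss] at this
        have := hsub.length_le
        rw [← List.countP_eq_length_filter] at this
        omega
    · rintro ⟨d, hd, hcnt⟩
      -- a door missed by ≥ num_required buns: pick nr of its missers
      have hn : nr.toNat ≤ ds.countP (fun bun => decide (d ∉ bun)) := by omega
      obtain ⟨S, hs, hl, hmiss⟩ := exists_sublist_len_all hn
      refine ⟨S, ⟨hs, hl⟩, ?_⟩
      intro hall
      have hdu : d ∈ pvUnionAll S := (hall d).mpr hd
      obtain ⟨bun, hbS, hdb⟩ := (mem_pvUnionAll S d).mp hdu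
      have := hmiss bun hbS
      simp only [decide_eq_true_eq] at this
      exact this hdb

-- ===== VERDICT (by name: the statement is the Claim_ definition above) =====
theorem is_valid_distribution_spec : Claim_equal_is_valid_distribution := by
  intro ds nr nd _ hnr
  unfold Spec_is_valid_distribution is_valid_distribution is_valid_distribution_alt
  rw [loop2_eq ds nr nd hnr]
  cases h1 : (PySem.List.pyRange 1 nr 1).any (fun i =>
      (pvCombos i.toNat ds).any (fun sel =>
        PySem.Set.equal (pvUnionAll sel) (pvDoors nd))) with
  | true => simp
  | false =>
    cases h2 : pvExistsBadSelection ds nd nr <;> simp
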